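-- pv_equiv track=rewrite | github.com/Dan-Lore/BurnToSolve2024 | Задача 10. Параллелепипеды.py | solve
-- ===== SOURCE A (Python) =====
-- def check_1in2(box1, box2):
--     for i in range(len(box1)):
--         if box1[i] > box2[i]:
--             return False
--     return True
--
-- def solve(m, boxes):
--     dp = [1] * m
--
--     for i in range(1, m):
--         for j in range(i):
--             if check_1in2(boxes[j], boxes[i]):
--                 dp[i] = max(dp[i], dp[j] + 1)
--
--     max_length = max(dp)
--     return max_length
-- ===== SOURCE B (Python) =====
-- def check_1in2(box1, box2):
--     for i in range(len(box1)):
--         if box1[i] > box2[i]: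
--             return False
--     return True
--
-- def solve(m, boxes):
--     # top-down memoized recursion: best(i) = longest nesting chain ending at box i,
--     # cached and driven in increasing order so recursion stays shallow
--     cache = []
--
--     def best(i):
--         if i < len(cache):
--             return cache[i]
--         r = 1 + max((best(j) for j in range(i)
--                      if check_1in2(boxes[j], boxes[i])), default=0)
--         cache.append(r)
--         return r
--
--     for i in range(m):
--         best(i)
--     return max(cache)
-- ===== Notes on version B (the rewrite author's own statement) =====
-- stated objective: alternative
-- what changed: The bottom-up dp array updated in place (dp[i] = max(dp[i], dp[j]+1)) is replaced by a top-down memoized recursion best(i) = 1 + max(best(j) for nesting j < i, default 0), cached in a list and driven in increasing order; the componentwise nesting test is unchanged.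
import Mathlib
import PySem

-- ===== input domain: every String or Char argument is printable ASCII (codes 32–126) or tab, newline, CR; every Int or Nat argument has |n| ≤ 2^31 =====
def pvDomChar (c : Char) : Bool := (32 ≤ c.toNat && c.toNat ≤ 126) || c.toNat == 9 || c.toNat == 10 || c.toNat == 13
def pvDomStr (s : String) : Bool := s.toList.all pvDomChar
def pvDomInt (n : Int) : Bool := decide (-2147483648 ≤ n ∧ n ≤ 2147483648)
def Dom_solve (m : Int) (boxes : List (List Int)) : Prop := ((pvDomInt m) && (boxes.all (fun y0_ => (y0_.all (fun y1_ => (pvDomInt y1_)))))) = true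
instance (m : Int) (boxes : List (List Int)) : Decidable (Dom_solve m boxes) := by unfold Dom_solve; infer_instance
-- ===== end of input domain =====

-- B replaces the bottom-up in-place dp array by a top-down memoized recursion
-- (best(i) cached, driven in increasing order); same cost, different decomposition.

-- ===== PORT A =====
-- check_1in2: loop over range(len(box1)) with early return False; indexing is
-- total via pyGetD (Pre_solve guarantees every index Python reads is in range).
def check1in2Go (b1 b2 : List Int) : List Int → Bool
  | [] => true
  | i :: rest =>
    if PySem.List.pyGetD b1 i 0 > PySem.List.pyGetD b2 i 0 then false
    else check1in2Go b1 b2 rest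

def check1in2 (b1 b2 : List Int) : Bool :=
  check1in2Go b1 b2 (PySem.List.pyRange 0 (b1.length : Int) 1)

-- dp = [1]*m; nested loops update dp in place; return max(dp)
-- (max([]) raises ValueError — those inputs are excluded by Pre_solve).
def solve (m : Int) (boxes : List (List Int)) : Int :=
  (PySem.List.max?
    ((PySem.List.pyRange 1 m 1).foldl (fun dp i =>
      (PySem.List.pyRange 0 i 1).foldl (fun dp j =>
        if check1in2 (PySem.List.pyGetD boxes j []) (PySem.List.pyGetD boxes i []) then
          PySem.List.pySetD dp i (max (PySem.List.pyGetD dp i 0) (PySem.List.pyGetD dp j 0 + 1))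
        else dp) dp)
      (List.replicate m.toNat 1))
    (fun x => x)).getD 0

-- ===== PORT B =====
-- cache-driven memoized recursion; best(j) inside the generator always hits the
-- cache (j < i = len(cache)), so it is ported as the cache lookup it performs;
-- the inner fold is Python's max(generator, default=0) evaluated left to right.
def solve_alt (m : Int) (boxes : List (List Int)) : Int :=
  (PySem.List.max?
    ((PySem.List.pyRange 0 m 1).foldl (fun cache i =>
      if i < (cache.length : Int) then cache  -- memo hit: best returns cache[i], driver discards it
      else
        cache ++ [1 + ((PySem.List.pyRange 0 i 1).foldl (fun acc j =>
          if check1in2 (PySem.List.pyGetD boxes j []) (PySem.List.pyGetD boxes i []) then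
            some (match acc with
                  | none => PySem.List.pyGetD cache j 0
                  | some a => max a (PySem.List.pyGetD cache j 0))
          else acc) (none : Option Int)).getD 0])
      ([] : List Int))
    (fun x => x)).getD 0

-- ===== PRECONDITION & SPEC =====
-- Pre_solve is exactly the set of inputs on which Python's solve returns: it
-- excludes m ≤ 0 (max of the empty dp raises ValueError), m ≥ 2 with
-- m > len(boxes) (boxes[i] raises IndexError), and any visited pair j < i where
-- boxes[j] is longer than boxes[i] and no coordinate within boxes[i]'s length
-- already exceeds — there check_1in2 reads past the end of boxes[i] (IndexError).
def Pre_solve (m : Int) (boxes : List (List Int)) : Prop :=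
  1 ≤ m ∧ (m = 1 ∨ m ≤ (boxes.length : Int)) ∧
  ∀ i < m.toNat, ∀ j < i,
    (boxes.getD j []).length ≤ (boxes.getD i []).length ∨
    ∃ k < (boxes.getD i []).length,
      (boxes.getD i []).getD k 0 < (boxes.getD j []).getD k 0

instance (m : Int) (boxes : List (List Int)) : Decidable (Pre_solve m boxes) := by
  unfold Pre_solve; infer_instance

def pvWitness_solve : Int × List (List Int) := (2, [[1, 2], [2, 3]])

def Spec_solve (m : Int) (boxes : List (List Int)) (out : Int) : Prop := out = solve_alt m boxes
instance (m : Int) (boxes : List (List Int)) (out : Int) : Decidable (Spec_solve m boxes out) := by unfold Spec_solve; infer_instance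

-- ===== CLAIM (what is proved, stated in full; the proofs are below) =====
def Claim_equal_solve : Prop := ∀ (m : Int) (boxes : List (List Int)), Dom_solve m boxes → Pre_solve m boxes → Spec_solve m boxes (solve m boxes)

-- ===== LEMMAS AND PROOFS =====

-- canonical chain-length table: bests boxes n = [best 0, …, best (n-1)]
def bestsF (boxes : List (List Int)) (prev : List Int) (n : Nat) : Int :=
  (List.range n).foldl (fun a j =>
    if check1in2 (boxes.getD j []) (boxes.getD n []) then max a (prev.getD j 0 + 1) else a) 1

def bests (boxes : List (List Int)) : Nat → List Int
  | 0 => []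
  | n + 1 => bests boxes n ++ [bestsF boxes (bests boxes n) n]

theorem length_bests (boxes : List (List Int)) (n : Nat) : (bests boxes n).length = n := by
  induction n with
  | zero => rfl
  | succ k ih => simp [bests, ih]

theorem foldl_if_max_le (P : Nat → Bool) (w : Nat → Int) (l : List Nat) :
    ∀ a b : Int, a ≤ b →
      a ≤ l.foldl (fun c j => if P j then max c (w j) else c) b := by
  induction l with
  | nil => intro a b h; simpa using h
  | cons j t ih =>
    intro a b h
    simp only [List.foldl_cons]
    apply ih
    by_cases hP : P j
    · simp only [hP, if_true]; exact le_trans h (le_max_left _ _)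
    · simpa [hP] using h

theorem bests_pos (boxes : List (List Int)) (n : Nat) :
    ∀ x ∈ bests boxes n, 1 ≤ x := by
  induction n with
  | zero => intro x hx; simp [bests] at hx
  | succ k ih =>
    intro x hx
    simp only [bests, List.mem_append, List.mem_singleton] at hx
    rcases hx with hx | rfl
    · exact ih x hx
    · exact foldl_if_max_le _ _ _ 1 1 le_rfl

theorem getD_set_self (l : List Int) (k : Nat) (h : k < l.length) (a : Int) :
    (l.set k a).getD k 0 = a := by
  simp [List.getD, List.getElem?_set_self h]

theorem getD_set_ne (l : List Int) (k j : Nat) (h : j ≠ k) (a : Int) :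
    (l.set k a).getD j 0 = l.getD j 0 := by
  simp [List.getD, List.getElem?_set_ne (Ne.symm h)]

-- the inner loop of A only ever writes slot k and reads slots j < k of the
-- original dp, so it is one .set of a running maximum
theorem foldl_set_max_aux (P : Nat → Bool) (dp : List Int) (k : Nat)
    (hk : k < dp.length) :
    ∀ (js : List Nat), (∀ j ∈ js, j < k) → ∀ a : Int,
      js.foldl (fun d j =>
          if P j then d.set k (max (d.getD k 0) (d.getD j 0 + 1)) else d) (dp.set k a)
      = dp.set k (js.foldl (fun b j => if P j then max b (dp.getD j 0 + 1) else b) a) := by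
  intro js
  induction js with
  | nil => intro _ a; rfl
  | cons j t ih =>
    intro hjs a
    have hj : j < k := hjs j (List.mem_cons_self ..)
    have hstep :
        (if P j then (dp.set k a).set k
            (max ((dp.set k a).getD k 0) ((dp.set k a).getD j 0 + 1))
          else dp.set k a)
        = dp.set k (if P j then max a (dp.getD j 0 + 1) else a) := by
      by_cases hP : P j
      · rw [if_pos hP, if_pos hP, List.set_set, getD_set_self dp k hk a,
          getD_set_ne dp k j (Nat.ne_of_lt hj) a]
      · rw [if_neg hP, if_neg hP]
    simp only [List.foldl_cons, hstep]
    exact ih (fun x hx => hjs x (List.mem_cons_of_mem _ hx)) _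

theorem foldl_set_max (P : Nat → Bool) (dp : List Int) (k : Nat)
    (hk : k < dp.length) (js : List Nat) (hjs : ∀ j ∈ js, j < k) :
    js.foldl (fun d j =>
        if P j then d.set k (max (d.getD k 0) (d.getD j 0 + 1)) else d) dp
    = dp.set k (js.foldl (fun b j => if P j then max b (dp.getD j 0 + 1) else b)
        (dp.getD k 0)) := by
  have h0 : dp = dp.set k (dp.getD k 0) := by
    rw [List.getD_eq_getElem _ _ hk, List.set_getElem_self]
  conv_lhs => rw [h0]
  exact foldl_set_max_aux P dp k hk js hjs _

-- B's '1 + max(generator, default=0)' run left to right equals A's running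
-- maximum of value+1 started at 1, as long as all cached values are ≥ 0
theorem opt_plain_if (P : Nat → Bool) (v : Nat → Int) :
    ∀ (l : List Nat), (∀ j ∈ l, 0 ≤ v j) → ∀ (acc : Option Int) (b : Int),
      ((acc = none ∧ b = 1) ∨ (∃ c, acc = some c ∧ 0 ≤ c ∧ b = c + 1)) →
      1 + (l.foldl (fun acc j => if P j then
            some (match acc with
                  | none => v j
                  | some a => max a (v j))
          else acc) acc).getD 0
        = l.foldl (fun b j => if P j then max b (v j + 1) else b) b := by
  intro l
  induction l with
  | nil =>
    intro _ acc b h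
    rcases h with ⟨rfl, rfl⟩ | ⟨c, rfl, hc, rfl⟩
    · simp
    · simp only [List.foldl_nil, Option.getD_some]; omega
  | cons j t ih =>
    intro hv acc b h
    have hj : 0 ≤ v j := hv j (List.mem_cons_self ..)
    simp only [List.foldl_cons]
    apply ih (fun x hx => hv x (List.mem_cons_of_mem _ hx))
    by_cases hP : P j
    · rcases h with ⟨rfl, rfl⟩ | ⟨c, rfl, hc, rfl⟩
      · right
        refine ⟨v j, ?_, hj, ?_⟩
        · rw [if_pos hP]
        · rw [if_pos hP]; exact max_eq_right (by omega : (1 : Int) ≤ v j + 1)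
      · right
        refine ⟨max c (v j), by rw [if_pos hP], le_trans hc (le_max_left _ _), ?_⟩
        rw [if_pos hP, ← max_add_add_right]
    · rcases h with ⟨rfl, rfl⟩ | ⟨c, rfl, hc, rfl⟩
      · left; rw [if_neg hP, if_neg hP]; exact ⟨rfl, rfl⟩
      · right; exact ⟨c, by rw [if_neg hP], hc, by rw [if_neg hP]⟩

-- the state of A's outer loop after rounds 1 … k is bests k padded with ones
theorem A_eval_aux (boxes : List (List Int)) (n : Nat) :
    ∀ (d k : Nat), 1 ≤ k → k + d = n →
      (PySem.List.pyRange (k : Int) (n : Int) 1).foldl (fun dp i =>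
        (PySem.List.pyRange 0 i 1).foldl (fun dp j =>
          if check1in2 (PySem.List.pyGetD boxes j []) (PySem.List.pyGetD boxes i []) then
            PySem.List.pySetD dp i
              (max (PySem.List.pyGetD dp i 0) (PySem.List.pyGetD dp j 0 + 1))
          else dp) dp)
        (bests boxes k ++ List.replicate d 1)
      = bests boxes n := by
  intro d
  induction d with
  | zero =>
    intro k _ hkn
    have hk : k = n := by omega
    subst hk
    rw [PySem.List.pyRange_one_eq_nil le_rfl]
    simp
  | succ d ih =>
    intro k hk1 hkn
    have hklt : (k : Int) < (n : Int) := by exact_mod_cast (by omega : k < n)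
    rw [PySem.List.pyRange_one_cons hklt]
    simp only [List.foldl_cons]
    have hstate :
        (PySem.List.pyRange 0 (k : Int) 1).foldl (fun dp j =>
          if check1in2 (PySem.List.pyGetD boxes j []) (PySem.List.pyGetD boxes (k : Int) []) then
            PySem.List.pySetD dp (k : Int)
              (max (PySem.List.pyGetD dp (k : Int) 0) (PySem.List.pyGetD dp j 0 + 1))
          else dp) (bests boxes k ++ List.replicate (d + 1) 1)
        = bests boxes (k + 1) ++ List.replicate d 1 := by
      rw [PySem.List.pyRange_zero_natCast, List.foldl_map]
      simp only [PySem.List.pyGetD_natCast, PySem.List.pySetD_natCast]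
      have hlen : k < (bests boxes k ++ List.replicate (d + 1) 1).length := by
        simp [length_bests]
      rw [foldl_set_max _ _ _ hlen _ (fun j hj => List.mem_range.mp hj)]
      have hgk : (bests boxes k ++ List.replicate (d + 1) 1).getD k 0 = 1 := by
        rw [List.getD_append_right _ _ _ _ (by rw [length_bests])]
        simp [length_bests]
      have hcongr :
          (List.range k).foldl (fun b j =>
            if check1in2 (boxes.getD j []) (boxes.getD k []) then
              max b ((bests boxes k ++ List.replicate (d + 1) 1).getD j 0 + 1)
            else b) 1
          = bestsF boxes (bests boxes k) k := by
        unfold bestsF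
        apply PySem.List.foldl_congr_mem
        intro acc j hj
        rw [List.getD_append _ _ _ _ (by rw [length_bests]; exact List.mem_range.mp hj)]
      rw [hgk, hcongr, List.replicate_succ,
        List.set_append_right _ _ (le_of_eq (length_bests boxes k))]
      simp [length_bests, bests]
    rw [hstate, (by push_cast; ring : (k : Int) + 1 = ((k + 1 : Nat) : Int))]
    exact ih (k + 1) (by omega) (by omega)

-- the cache of B's driver loop after rounds 0 … k-1 is exactly bests k
theorem B_eval_aux (boxes : List (List Int)) (n : Nat) :
    ∀ (d k : Nat), k + d = n →
      (PySem.List.pyRange (k : Int) (n : Int) 1).foldl (fun cache i =>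
        if i < (cache.length : Int) then cache
        else
          cache ++ [1 + ((PySem.List.pyRange 0 i 1).foldl (fun acc j =>
            if check1in2 (PySem.List.pyGetD boxes j []) (PySem.List.pyGetD boxes i []) then
              some (match acc with
                    | none => PySem.List.pyGetD cache j 0
                    | some a => max a (PySem.List.pyGetD cache j 0))
            else acc) (none : Option Int)).getD 0])
        (bests boxes k)
      = bests boxes n := by
  intro d
  induction d with
  | zero =>
    intro k hkn
    have hk : k = n := by omega
    subst hk
    rw [PySem.List.pyRange_one_eq_nil le_rfl]
    rfl
  | succ d ih =>
    intro k hkn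
    have hklt : (k : Int) < (n : Int) := by exact_mod_cast (by omega : k < n)
    rw [PySem.List.pyRange_one_cons hklt]
    simp only [List.foldl_cons]
    have hguard : ¬ ((k : Int) < ((bests boxes k).length : Int)) := by
      rw [length_bests]; exact lt_irrefl _
    rw [if_neg hguard]
    have hr :
        1 + ((PySem.List.pyRange 0 (k : Int) 1).foldl (fun acc j =>
          if check1in2 (PySem.List.pyGetD boxes j []) (PySem.List.pyGetD boxes (k : Int) []) then
            some (match acc with
                  | none => PySem.List.pyGetD (bests boxes k) j 0
                  | some a => max a (PySem.List.pyGetD (bests boxes k) j 0))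
          else acc) (none : Option Int)).getD 0
        = bestsF boxes (bests boxes k) k := by
      rw [PySem.List.pyRange_zero_natCast, List.foldl_map]
      simp only [PySem.List.pyGetD_natCast]
      unfold bestsF
      refine opt_plain_if (fun j => check1in2 (boxes.getD j []) (boxes.getD k []))
        (fun j => (bests boxes k).getD j 0) (List.range k) (fun j hj => ?_)
        none 1 (Or.inl ⟨rfl, rfl⟩)
      have hjk : j < k := List.mem_range.mp hj
      have hmem : (bests boxes k).getD j 0 ∈ bests boxes k := by
        rw [List.getD_eq_getElem _ _ (by rw [length_bests]; exact hjk)]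
        exact List.getElem_mem _
      have := bests_pos boxes k _ hmem
      show 0 ≤ (bests boxes k).getD j 0
      omega
    rw [hr,
      (by simp [bests] : bests boxes k ++ [bestsF boxes (bests boxes k) k] = bests boxes (k + 1)),
      (by push_cast; ring : (k : Int) + 1 = ((k + 1 : Nat) : Int))]
    exact ih (k + 1) (by omega)

-- ===== VERDICT (by name: the statement is the Claim_ definition above) =====
theorem solve_spec : Claim_equal_solve := by
  intro m boxes _ hpre
  obtain ⟨hm, -, -⟩ := hpre
  unfold Spec_solve solve solve_alt
  obtain ⟨p, hp⟩ : ∃ p : Nat, m.toNat = p + 1 := ⟨m.toNat - 1, by omega⟩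
  have hmn : ((p + 1 : Nat) : Int) = m := by
    rw [← hp]; exact Int.toNat_of_nonneg (by omega)
  rw [← hmn]
  simp only [Int.toNat_natCast]
  have hA := A_eval_aux boxes (p + 1) p 1 le_rfl (by omega)
  simp only [Nat.cast_one] at hA
  have hB := B_eval_aux boxes (p + 1) (p + 1) 0 (by omega)
  simp only [Nat.cast_zero] at hB
  rw [show bests boxes 0 = ([] : List Int) from rfl] at hB
  have hinit : List.replicate (p + 1) (1 : Int) = bests boxes 1 ++ List.replicate p 1 := by
    rw [List.replicate_succ]
    rfl
  rw [hinit, hA, hB]
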